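-- pv_equiv track=rewrite | github.com/paulharman/dnd-character-scraper | parser/formatters/base.py | format_feature_choices
-- ===== SOURCE A (Python) =====
-- from typing import Dict, Any, Optional, List
--
-- def format_feature_choices(choices: Dict[str, List[str]]) -> List[str]:
--     """
--     Format feature choices for display.
--
--     Args:
--         choices: Dictionary of choice types and their values
--
--     Returns:
--         List of formatted choice strings
--     """
--     formatted_choices = []
--
--     # Order choices by importance/frequency
--     choice_order = ['spells', 'languages', 'skills', 'tools', 'fighting_styles', 'expertise']
--
--     for choice_type in choice_order:
--         if choice_type in choices and choices[choice_type]: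
--             choice_list = ', '.join(choices[choice_type])
--             if choice_type == 'spells':
--                 formatted_choices.append(f"*Chosen Spells: {choice_list}*")
--             elif choice_type == 'languages':
--                 formatted_choices.append(f"*Chosen Languages: {choice_list}*")
--             elif choice_type == 'skills':
--                 formatted_choices.append(f"*Chosen Skills: {choice_list}*")
--             elif choice_type == 'tools':
--                 formatted_choices.append(f"*Chosen Tools: {choice_list}*")
--             elif choice_type == 'fighting_styles':
--                 formatted_choices.append(f"*Chosen Fighting Style: {choice_list}*")
--             elif choice_type == 'expertise':
--                 formatted_choices.append(f"*Expertise: {choice_list}*")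
--
--     return formatted_choices
-- ===== SOURCE B (Python) =====
-- def format_feature_choices(choices):
--     order = {'spells': 0, 'languages': 1, 'skills': 2, 'tools': 3,
--              'fighting_styles': 4, 'expertise': 5}
--     labels = ['Chosen Spells', 'Chosen Languages', 'Chosen Skills',
--               'Chosen Tools', 'Chosen Fighting Style', 'Expertise']
--     slots = [None] * 6
--     for key, values in choices.items():
--         if values and key in order:
--             i = order[key]
--             slots[i] = f"*{labels[i]}: {', '.join(values)}*"
--     return [s for s in slots if s is not None]
-- ===== Notes on version B (the rewrite author's own statement) =====
-- stated objective: alternative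
-- what changed: Instead of probing the six known keys against the dict in a fixed order with an if-elif chain, B makes one pass over the dict's own items, scattering each recognised key's formatted string into a positional slot array (via a key->index table) and then compacting the non-empty slots; output order comes from slot positions, not from the scan.
import Mathlib
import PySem

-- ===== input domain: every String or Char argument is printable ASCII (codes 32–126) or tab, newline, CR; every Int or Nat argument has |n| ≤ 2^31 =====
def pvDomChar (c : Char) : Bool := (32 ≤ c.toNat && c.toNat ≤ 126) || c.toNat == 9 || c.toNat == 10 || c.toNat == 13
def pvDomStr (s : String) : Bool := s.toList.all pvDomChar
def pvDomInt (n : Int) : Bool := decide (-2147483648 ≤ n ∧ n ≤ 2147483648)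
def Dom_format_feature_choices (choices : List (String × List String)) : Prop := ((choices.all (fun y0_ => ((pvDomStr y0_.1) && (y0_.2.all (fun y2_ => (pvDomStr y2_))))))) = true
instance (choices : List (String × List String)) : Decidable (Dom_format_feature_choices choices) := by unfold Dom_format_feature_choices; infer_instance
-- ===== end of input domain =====

-- B scans the dict's items once, scattering formatted strings into positional slots via a key->index table, instead of A's fixed-order probing of six keys with an if-elif chain (alternative; same cost). Pre_ excludes association lists with duplicate keys, which do not arise from a Python dict (its representation has unique keys).


-- ===== PORT A =====
-- A's loop body as a named helper: membership+truthiness test, then the if-elif chain on the key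
def stepA (d : PySem.Dict String (List String)) (formatted_choices : List String) (choice_type : String) : List String :=
  match d.get? choice_type with
  | none => formatted_choices
  | some vs =>
    if vs = [] then formatted_choices
    else
      let choice_list := PySem.Str.join ", " vs
      if choice_type = "spells" then formatted_choices ++ ["*Chosen Spells: " ++ choice_list ++ "*"]
      else if choice_type = "languages" then formatted_choices ++ ["*Chosen Languages: " ++ choice_list ++ "*"]
      else if choice_type = "skills" then formatted_choices ++ ["*Chosen Skills: " ++ choice_list ++ "*"]
      else if choice_type = "tools" then formatted_choices ++ ["*Chosen Tools: " ++ choice_list ++ "*"]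
      else if choice_type = "fighting_styles" then formatted_choices ++ ["*Chosen Fighting Style: " ++ choice_list ++ "*"]
      else if choice_type = "expertise" then formatted_choices ++ ["*Expertise: " ++ choice_list ++ "*"]
      else formatted_choices

-- literal transliteration of A: fold A's loop body over choice_order, starting from []
def format_feature_choices (choices : List (String × List String)) : List String :=
  (["spells", "languages", "skills", "tools", "fighting_styles", "expertise"] : List String).foldl
    (stepA (PySem.Dict.mk choices)) []

-- ===== PORT B =====
-- B's key -> slot-index table and the label array, as in Source B
def orderB : PySem.Dict String Nat :=
  PySem.Dict.mk [("spells", 0), ("languages", 1), ("skills", 2), ("tools", 3), ("fighting_styles", 4), ("expertise", 5)]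

def labelsB : List String :=
  ["Chosen Spells", "Chosen Languages", "Chosen Skills", "Chosen Tools", "Chosen Fighting Style", "Expertise"]

-- B's loop body: if values is truthy and key is in the table, write the formatted string into its slot
def stepB (slots : List (Option String)) (p : String × List String) : List (Option String) :=
  if p.2 = [] then slots
  else
    match orderB.get? p.1 with
    | some i => slots.set i (some ("*" ++ labelsB.getD i "" ++ ": " ++ PySem.Str.join ", " p.2 ++ "*"))
    | none => slots

-- literal transliteration of B: one pass over the items scattering into 6 slots, then compact
def format_feature_choices_alt (choices : List (String × List String)) : List String :=
  (choices.foldl stepB [none, none, none, none, none, none]).filterMap id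

-- ===== PRECONDITION & SPEC =====
-- Pre_ excludes association lists with duplicate keys: they do not arise from a Python dict
-- (whose representation has unique keys) and their dict reading is ambiguous (first vs last match).
def Pre_format_feature_choices (choices : List (String × List String)) : Prop :=
  (choices.map Prod.fst).Nodup
instance (choices : List (String × List String)) : Decidable (Pre_format_feature_choices choices) := by unfold Pre_format_feature_choices; infer_instance

def pvWitness_format_feature_choices : (List (String × List String)) :=
  [("expertise", ["Stealth", "Arcana"]), ("spells", ["Misty Step"]), ("colour", ["red"])]

def Spec_format_feature_choices (choices : List (String × List String)) (out : List String) : Prop := out = format_feature_choices_alt choices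
instance (choices : List (String × List String)) (out : List String) : Decidable (Spec_format_feature_choices choices out) := by unfold Spec_format_feature_choices; infer_instance

-- ===== CLAIM (what is proved, stated in full; the proofs are below) =====
def Claim_equal_format_feature_choices : Prop := ∀ (choices : List (String × List String)), Dom_format_feature_choices choices → Pre_format_feature_choices choices → Spec_format_feature_choices choices (format_feature_choices choices)

-- ===== LEMMAS AND PROOFS =====
-- What one table entry contributes: none when the key is absent or its list is falsy, else the labeled string
def cellB (d : PySem.Dict String (List String)) (kl : String × String) : Option String :=
  match d.get? kl.1 with
  | none => none
  | some vs =>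
    if vs = [] then none
    else some ("*" ++ kl.2 ++ ": " ++ PySem.Str.join ", " vs ++ "*")

-- Peeling one item off the front of the dict's representation
theorem cellB_mk_cons (k : String) (vs : List String) (l : List (String × List String)) (kl : String × String) :
    cellB (PySem.Dict.mk ((k, vs) :: l)) kl =
      if k = kl.1 then (if vs = [] then none else some ("*" ++ kl.2 ++ ": " ++ PySem.Str.join ", " vs ++ "*"))
      else cellB (PySem.Dict.mk l) kl := by
  by_cases h : k = kl.1 <;> simp [cellB, PySem.Dict.get?_mk_cons, h]

-- A key not among the represented keys contributes nothing
theorem cellB_of_not_mem (l : List (String × List String)) (kl : String × String)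
    (h : kl.1 ∉ l.map Prod.fst) : cellB (PySem.Dict.mk l) kl = none := by
  have : (PySem.Dict.mk l).get? kl.1 = none := by
    rw [PySem.Dict.get?_eq_none_iff_not_mem_keys]
    simpa [PySem.Dict.keys_mk] using h
  simp [cellB, this]

-- A key of the table not equal to the head key: Option.or over the tail ignores an absent key
theorem or_skip (k : String) (t : List (String × List String)) (k' label : String)
    (hk : k ∉ t.map Prod.fst) (s : Option String) :
    ((if k = k' then none else cellB (PySem.Dict.mk t) (k', label)).or s)
      = (cellB (PySem.Dict.mk t) (k', label)).or s := by
  by_cases h : k = k'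
  · rw [if_pos h, cellB_of_not_mem t (k', label) (h ▸ hk)]
  · rw [if_neg h]

-- An unknown key has no slot in the order table
theorem orderB_get?_none (k : String) (h0 : ¬ k = "spells") (h1 : ¬ k = "languages")
    (h2 : ¬ k = "skills") (h3 : ¬ k = "tools") (h4 : ¬ k = "fighting_styles")
    (h5 : ¬ k = "expertise") : orderB.get? k = none := by
  simp only [orderB, PySem.Dict.get?_mk_cons, beq_iff_eq]
  simp [PySem.Dict.get?, Ne.symm h0, Ne.symm h1, Ne.symm h2, Ne.symm h3, Ne.symm h4, Ne.symm h5]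

-- Characterisation of B's scatter loop: under unique keys, each final slot is that key's cell,
-- falling back to the initial slot content
theorem foldB_char (l : List (String × List String)) (h : (l.map Prod.fst).Nodup)
    (s0 s1 s2 s3 s4 s5 : Option String) :
    l.foldl stepB [s0, s1, s2, s3, s4, s5] =
      [(cellB (PySem.Dict.mk l) ("spells", "Chosen Spells")).or s0,
       (cellB (PySem.Dict.mk l) ("languages", "Chosen Languages")).or s1,
       (cellB (PySem.Dict.mk l) ("skills", "Chosen Skills")).or s2,
       (cellB (PySem.Dict.mk l) ("tools", "Chosen Tools")).or s3,
       (cellB (PySem.Dict.mk l) ("fighting_styles", "Chosen Fighting Style")).or s4,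
       (cellB (PySem.Dict.mk l) ("expertise", "Expertise")).or s5] := by
  induction l generalizing s0 s1 s2 s3 s4 s5 with
  | nil =>
      simp [cellB_of_not_mem]
  | cons p t ih =>
      obtain ⟨k, vs⟩ := p
      simp only [List.map_cons, List.nodup_cons] at h
      obtain ⟨hk, ht⟩ := h
      simp only [List.foldl_cons]
      by_cases hv : vs = []
      · rw [show stepB [s0, s1, s2, s3, s4, s5] (k, vs) = [s0, s1, s2, s3, s4, s5] by
          simp [stepB, hv]]
        rw [ih ht]
        have e : ∀ kl : String × String,
            cellB (PySem.Dict.mk ((k, vs) :: t)) kl = if k = kl.1 then none else cellB (PySem.Dict.mk t) kl := by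
          intro kl; rw [cellB_mk_cons]; simp [hv]
        simp only [e]
        rw [or_skip k t "spells" "Chosen Spells" hk s0,
            or_skip k t "languages" "Chosen Languages" hk s1,
            or_skip k t "skills" "Chosen Skills" hk s2,
            or_skip k t "tools" "Chosen Tools" hk s3,
            or_skip k t "fighting_styles" "Chosen Fighting Style" hk s4,
            or_skip k t "expertise" "Expertise" hk s5]
      · by_cases h0 : k = "spells"
        · subst h0
          rw [show stepB [s0, s1, s2, s3, s4, s5] ("spells", vs)
                = [some ("*Chosen Spells: " ++ PySem.Str.join ", " vs ++ "*"), s1, s2, s3, s4, s5] by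
              simp [stepB, hv, orderB, labelsB, PySem.Dict.get?_mk_cons, List.set]]
          rw [ih ht]
          simp [cellB_mk_cons, hv, cellB_of_not_mem t ("spells", "Chosen Spells") hk]
        by_cases h1 : k = "languages"
        · subst h1
          rw [show stepB [s0, s1, s2, s3, s4, s5] ("languages", vs)
                = [s0, some ("*Chosen Languages: " ++ PySem.Str.join ", " vs ++ "*"), s2, s3, s4, s5] by
              simp [stepB, hv, orderB, labelsB, PySem.Dict.get?_mk_cons, List.set]]
          rw [ih ht]
          simp [cellB_mk_cons, hv, cellB_of_not_mem t ("languages", "Chosen Languages") hk]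
        by_cases h2 : k = "skills"
        · subst h2
          rw [show stepB [s0, s1, s2, s3, s4, s5] ("skills", vs)
                = [s0, s1, some ("*Chosen Skills: " ++ PySem.Str.join ", " vs ++ "*"), s3, s4, s5] by
              simp [stepB, hv, orderB, labelsB, PySem.Dict.get?_mk_cons, List.set]]
          rw [ih ht]
          simp [cellB_mk_cons, hv, cellB_of_not_mem t ("skills", "Chosen Skills") hk]
        by_cases h3 : k = "tools"
        · subst h3
          rw [show stepB [s0, s1, s2, s3, s4, s5] ("tools", vs)
                = [s0, s1, s2, some ("*Chosen Tools: " ++ PySem.Str.join ", " vs ++ "*"), s4, s5] by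
              simp [stepB, hv, orderB, labelsB, PySem.Dict.get?_mk_cons, List.set]]
          rw [ih ht]
          simp [cellB_mk_cons, hv, cellB_of_not_mem t ("tools", "Chosen Tools") hk]
        by_cases h4 : k = "fighting_styles"
        · subst h4
          rw [show stepB [s0, s1, s2, s3, s4, s5] ("fighting_styles", vs)
                = [s0, s1, s2, s3, some ("*Chosen Fighting Style: " ++ PySem.Str.join ", " vs ++ "*"), s5] by
              simp [stepB, hv, orderB, labelsB, PySem.Dict.get?_mk_cons, List.set]]
          rw [ih ht]
          simp [cellB_mk_cons, hv, cellB_of_not_mem t ("fighting_styles", "Chosen Fighting Style") hk]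
        by_cases h5 : k = "expertise"
        · subst h5
          rw [show stepB [s0, s1, s2, s3, s4, s5] ("expertise", vs)
                = [s0, s1, s2, s3, s4, some ("*Expertise: " ++ PySem.Str.join ", " vs ++ "*")] by
              simp [stepB, hv, orderB, labelsB, PySem.Dict.get?_mk_cons, List.set]]
          rw [ih ht]
          simp [cellB_mk_cons, hv, cellB_of_not_mem t ("expertise", "Expertise") hk]
        · rw [show stepB [s0, s1, s2, s3, s4, s5] (k, vs) = [s0, s1, s2, s3, s4, s5] by
            simp [stepB, hv, orderB_get?_none k h0 h1 h2 h3 h4 h5]]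
          rw [ih ht]
          simp only [cellB_mk_cons, if_neg (fun hx => h0 hx), if_neg (fun hx => h1 hx),
            if_neg (fun hx => h2 hx), if_neg (fun hx => h3 hx), if_neg (fun hx => h4 hx),
            if_neg (fun hx => h5 hx)]

-- On each key of the table, A's loop step appends exactly what that key's cell contributes.
theorem stepA_eq_cell (d : PySem.Dict String (List String)) (acc : List String)
    (k label : String)
    (h : (k, label) ∈ ([("spells", "Chosen Spells"), ("languages", "Chosen Languages"),
      ("skills", "Chosen Skills"), ("tools", "Chosen Tools"),
      ("fighting_styles", "Chosen Fighting Style"), ("expertise", "Expertise")] :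
        List (String × String))) :
    stepA d acc k = acc ++ (cellB d (k, label)).toList := by
  simp only [List.mem_cons, List.not_mem_nil, or_false, Prod.mk.injEq] at h
  obtain ⟨rfl, rfl⟩ | ⟨rfl, rfl⟩ | ⟨rfl, rfl⟩ | ⟨rfl, rfl⟩ | ⟨rfl, rfl⟩ | ⟨rfl, rfl⟩ := h <;>
    · unfold stepA cellB
      cases d.get? _ with
      | none => simp
      | some vs => cases vs with
        | nil => simp
        | cons a l => simp

-- ===== VERDICT (by name: the statement is the Claim_ definition above) =====
theorem format_feature_choices_spec : Claim_equal_format_feature_choices := by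
  intro choices _ hpre
  unfold Spec_format_feature_choices format_feature_choices format_feature_choices_alt
  rw [foldB_char choices hpre]
  simp only [List.foldl_cons, List.foldl_nil, Option.or_none]
  rw [stepA_eq_cell _ _ "spells" "Chosen Spells" (by simp),
      stepA_eq_cell _ _ "languages" "Chosen Languages" (by simp),
      stepA_eq_cell _ _ "skills" "Chosen Skills" (by simp),
      stepA_eq_cell _ _ "tools" "Chosen Tools" (by simp),
      stepA_eq_cell _ _ "fighting_styles" "Chosen Fighting Style" (by simp),
      stepA_eq_cell _ _ "expertise" "Expertise" (by simp)]
  simp [List.filterMap_cons, Option.toList]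
  cases cellB (PySem.Dict.mk choices) ("spells", "Chosen Spells") <;>
    cases cellB (PySem.Dict.mk choices) ("languages", "Chosen Languages") <;>
    cases cellB (PySem.Dict.mk choices) ("skills", "Chosen Skills") <;>
    cases cellB (PySem.Dict.mk choices) ("tools", "Chosen Tools") <;>
    cases cellB (PySem.Dict.mk choices) ("fighting_styles", "Chosen Fighting Style") <;>
    cases cellB (PySem.Dict.mk choices) ("expertise", "Expertise") <;> simp
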